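-- pv_equiv track=rewrite | github.com/IntelligentTrading/science | genetic_algorithms/chart_plotter.py | condition_to_string
-- ===== SOURCE A (Python) =====
-- def condition_to_string(node, children_dict, labels):
--     children = children_dict[node]
--     if len(children) == 0:
--         return labels[node]
--     if len(children) == 1:
--         ch1 = condition_to_string(children[0], children_dict, labels)
--         return f'{labels[node]} ({ch1})'
--     if len(children) == 2:
--         ch1 = condition_to_string(children[0], children_dict, labels)
--         ch2 = condition_to_string(children[1], children_dict, labels)
--         return f'({ch1}) {labels[node]} ({ch2})'
--     return "???"
-- ===== SOURCE B (Python) =====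
-- def condition_to_string(node, children_dict, labels):
--     # Iterative fixpoint rounds instead of recursion: repeatedly render every
--     # still-pending node whose relevant children are already rendered, until a
--     # round makes no progress; then read off the root's string.
--     results = {}
--     pending = list(children_dict)
--     progress = True
--     while progress:
--         progress = False
--         still = []
--         for n in pending:
--             children = children_dict[n]
--             if len(children) > 2:
--                 results[n] = "???"
--             elif n in labels and all(c in results for c in children):
--                 if len(children) == 0:
--                     results[n] = labels[n]
--                 elif len(children) == 1:
--                     results[n] = f'{labels[n]} ({results[children[0]]})'
--                 else:
--                     results[n] = f'({results[children[0]]}) {labels[n]} ({results[children[1]]})'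
--             else:
--                 still.append(n)
--                 continue
--             progress = True
--         pending = still
--     return results[node]
-- ===== Notes on version B (the rewrite author's own statement) =====
-- stated objective: alternative
-- what changed: A's top-down recursion (re-rendering a shared subtree once per reference) is replaced by an iterative bottom-up fixpoint: rounds over the pending keys render every node whose relevant children are already rendered into a results dict, until a round makes no progress.
import Mathlib
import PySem

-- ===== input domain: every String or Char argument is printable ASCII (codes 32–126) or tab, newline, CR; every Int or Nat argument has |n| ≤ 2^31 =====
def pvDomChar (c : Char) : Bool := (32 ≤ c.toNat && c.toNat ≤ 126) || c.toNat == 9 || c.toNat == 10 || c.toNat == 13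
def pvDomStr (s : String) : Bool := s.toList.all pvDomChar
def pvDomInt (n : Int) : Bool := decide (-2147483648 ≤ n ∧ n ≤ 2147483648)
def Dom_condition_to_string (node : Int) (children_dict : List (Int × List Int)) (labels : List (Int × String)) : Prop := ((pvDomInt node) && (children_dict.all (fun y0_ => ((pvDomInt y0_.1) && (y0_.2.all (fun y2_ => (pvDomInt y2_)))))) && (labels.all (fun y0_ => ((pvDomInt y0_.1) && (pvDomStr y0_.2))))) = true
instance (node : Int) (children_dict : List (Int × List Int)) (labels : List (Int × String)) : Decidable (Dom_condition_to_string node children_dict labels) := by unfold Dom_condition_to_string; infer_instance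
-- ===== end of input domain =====

-- B replaces A's top-down recursion by an iterative bottom-up fixpoint: rounds over the
-- pending keys render every node whose children are already rendered (alternative
-- decomposition; equal wherever A returns, i.e. on Pre_).
-- Shared helper: Python dict lookup on an association list (first match), total form;
-- exact wherever the Python lookup does not raise KeyError (guaranteed by Pre_).
def pvGet? {α : Type} (d : List (Int × α)) (k : Int) : Option α :=
  match d with
  | [] => none
  | (a, b) :: t => if k = a then some b else pvGet? t k

def pvGetD {α : Type} (d : List (Int × α)) (k : Int) (dflt : α) : α :=
  (pvGet? d k).getD dflt

-- ===== PORT A =====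
-- Literal port of A's recursion; the fuel (children_dict.length + 1) is an artifact
-- needed for totality and always suffices under Pre_ (the recursion depth is bounded by
-- the number of keys on acyclic input); the out-of-fuel "" is never reached under Pre_.
def goA (cd : List (Int × List Int)) (labels : List (Int × String)) : Nat → Int → String
  | 0, _ => ""
  | Nat.succ f, node =>
    let children := pvGetD cd node []
    if children.length = 0 then
      pvGetD labels node ""
    else if children.length = 1 then
      let ch1 := goA cd labels f (children.getD 0 0)
      pvGetD labels node "" ++ " (" ++ ch1 ++ ")"
    else if children.length = 2 then
      let ch1 := goA cd labels f (children.getD 0 0)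
      let ch2 := goA cd labels f (children.getD 1 0)
      "(" ++ ch1 ++ ") " ++ pvGetD labels node "" ++ " (" ++ ch2 ++ ")"
    else
      "???"

def condition_to_string (node : Int) (children_dict : List (Int × List Int)) (labels : List (Int × String)) : String :=
  goA children_dict labels (children_dict.length + 1) node

-- ===== PORT B =====
-- One round of B's while-loop: walk the pending list, rendering each node whose
-- relevant children are rendered (dict write = cons, lookup = first match);
-- returns (results, still-pending, progress flag).
def goRound (cd : List (Int × List Int)) (labels : List (Int × String)) :
    List Int → List (Int × String) → List (Int × String) × List Int × Bool
  | [], results => (results, [], false)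
  | n :: rest, results =>
    let cs := pvGetD cd n []
    if 2 < cs.length then
      let r := goRound cd labels rest ((n, "???") :: results)
      (r.1, r.2.1, true)
    else
      match pvGet? labels n with
      | some lab =>
        if cs.all (fun c => (pvGet? results c).isSome) then
          let v :=
            if cs.length = 0 then lab
            else if cs.length = 1 then lab ++ " (" ++ pvGetD results (cs.getD 0 0) "" ++ ")"
            else "(" ++ pvGetD results (cs.getD 0 0) "" ++ ") " ++ lab ++ " (" ++ pvGetD results (cs.getD 1 0) "" ++ ")"
          let r := goRound cd labels rest ((n, v) :: results)
          (r.1, r.2.1, true)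
        else
          let r := goRound cd labels rest results
          (r.1, n :: r.2.1, r.2.2)
      | none =>
        let r := goRound cd labels rest results
        (r.1, n :: r.2.1, r.2.2)

-- B's while-loop; the fuel (number of keys + 1) is a totality artifact and always
-- suffices, since every round with progress strictly shrinks the pending list.
def goLoop (cd : List (Int × List Int)) (labels : List (Int × String)) :
    Nat → List Int → List (Int × String) → List (Int × String)
  | 0, _, results => results
  | Nat.succ f, pending, results =>
    let r := goRound cd labels pending results
    if r.2.2 then goLoop cd labels f r.2.1 r.1 else r.1

def condition_to_string_alt (node : Int) (children_dict : List (Int × List Int)) (labels : List (Int × String)) : String :=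
  pvGetD (goLoop children_dict labels (children_dict.length + 1) (children_dict.map Prod.fst) []) node ""

-- ===== PRECONDITION & SPEC =====
-- Closed-form graph notions used by Pre_: the relevant children of a node (A only
-- recurses into children lists of length ≤ 2), one expansion step, and the sets of
-- nodes reachable from a node (inclusive / proper descendants), as transitive closure
-- computed by enough iterations of the step function.
def lookupCh (cd : List (Int × List Int)) (n : Int) : Option (List Int) :=
  (cd.find? (fun p => p.1 == n)).map Prod.snd

def chl (cd : List (Int × List Int)) (n : Int) : List Int :=
  match lookupCh cd n with
  | some cs => if cs.length ≤ 2 then cs else []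
  | none => []

def stepF (cd : List (Int × List Int)) (s : Finset Int) : Finset Int :=
  s ∪ s.biUnion (fun n => (chl cd n).toFinset)

def reachF (cd : List (Int × List Int)) (n : Int) : Finset Int :=
  (stepF cd)^[2 * cd.length + 2] {n}

def descF (cd : List (Int × List Int)) (n : Int) : Finset Int :=
  (stepF cd)^[2 * cd.length + 2] (chl cd n).toFinset

-- Pre_: exactly the inputs on which the Python A returns: every node reachable from
-- `node` is a key of children_dict, has a label whenever its children list has length
-- ≤ 2 (A renders the label in exactly those cases), and the reachable child graph is
-- acyclic (otherwise A's recursion does not terminate).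
def Pre_condition_to_string (node : Int) (children_dict : List (Int × List Int)) (labels : List (Int × String)) : Prop :=
  (∀ m ∈ reachF children_dict node,
      m ∈ children_dict.map Prod.fst ∧
      (((lookupCh children_dict m).getD []).length ≤ 2 → m ∈ labels.map Prod.fst)) ∧
  (∀ m ∈ reachF children_dict node, m ∉ descF children_dict m)

instance (node : Int) (children_dict : List (Int × List Int)) (labels : List (Int × String)) : Decidable (Pre_condition_to_string node children_dict labels) := by
  unfold Pre_condition_to_string; infer_instance

def pvWitness_condition_to_string : Int × (List (Int × List Int)) × (List (Int × String)) :=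
  (0, [(0, [1, 2]), (1, []), (2, [])], [(0, "and"), (1, "a"), (2, "b")])

def Spec_condition_to_string (node : Int) (children_dict : List (Int × List Int)) (labels : List (Int × String)) (out : String) : Prop := out = condition_to_string_alt node children_dict labels
instance (node : Int) (children_dict : List (Int × List Int)) (labels : List (Int × String)) (out : String) : Decidable (Spec_condition_to_string node children_dict labels out) := by unfold Spec_condition_to_string; infer_instance

-- ===== CLAIM (what is proved, stated in full; the proofs are below) =====
def Claim_equal_condition_to_string : Prop := ∀ (node : Int) (children_dict : List (Int × List Int)) (labels : List (Int × String)), Dom_condition_to_string node children_dict labels → Pre_condition_to_string node children_dict labels → Spec_condition_to_string node children_dict labels (condition_to_string node children_dict labels)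

-- ===== LEMMAS AND PROOFS =====

theorem pvGet?_mem {α : Type} (d : List (Int × α)) (k : Int) (v : α)
    (h : pvGet? d k = some v) : (k, v) ∈ d := by
  induction d with
  | nil => simp [pvGet?] at h
  | cons p t ih =>
    obtain ⟨a, b⟩ := p
    by_cases hk : k = a
    · subst hk; simp [pvGet?] at h; simp [h]
    · simp [pvGet?, hk] at h
      exact List.mem_cons_of_mem _ (ih h)

theorem mem_keys_get? {α : Type} (d : List (Int × α)) (k : Int)
    (h : k ∈ d.map Prod.fst) : ∃ v, pvGet? d k = some v := by
  induction d with
  | nil => simp at h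
  | cons p t ih =>
    obtain ⟨a, b⟩ := p
    by_cases hk : k = a
    · exact ⟨b, by simp [pvGet?, hk]⟩
    · have h' : k ∈ t.map Prod.fst := by
        simp only [List.map_cons, List.mem_cons] at h; tauto
      obtain ⟨v, hv⟩ := ih h'
      exact ⟨v, by simp [pvGet?, hk, hv]⟩

theorem lookupCh_eq_pvGet? (cd : List (Int × List Int)) (n : Int) :
    lookupCh cd n = pvGet? cd n := by
  induction cd with
  | nil => simp [lookupCh, pvGet?]
  | cons p t ih =>
    obtain ⟨a, b⟩ := p
    by_cases hk : n = a
    · subst hk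
      simp [lookupCh, List.find?, pvGet?]
    · simp only [lookupCh, List.find?] at ih ⊢
      have : (a == n) = false := by simpa using fun h => hk h.symm
      simp [this, pvGet?, hk, ih]

-- all relevant-children elements of the whole dict
def allCh (cd : List (Int × List Int)) : Finset Int :=
  (cd.flatMap (fun p => if p.2.length ≤ 2 then p.2 else [])).toFinset

theorem chl_subset_allCh (cd : List (Int × List Int)) (n : Int) :
    (chl cd n).toFinset ⊆ allCh cd := by
  intro x hx
  simp only [List.mem_toFinset] at hx
  unfold chl at hx
  rw [lookupCh_eq_pvGet?] at hx
  cases h : pvGet? cd n with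
  | none => rw [h] at hx; simp at hx
  | some cs =>
    rw [h] at hx
    by_cases hl : cs.length ≤ 2
    · simp only [if_pos hl] at hx
      have hmem := pvGet?_mem cd n cs h
      simp only [allCh, List.mem_toFinset, List.mem_flatMap]
      exact ⟨(n, cs), hmem, by simpa [hl] using hx⟩
    · simp [hl] at hx

theorem allCh_card (cd : List (Int × List Int)) : (allCh cd).card ≤ 2 * cd.length := by
  have hlen : (cd.flatMap (fun p => if p.2.length ≤ 2 then p.2 else [])).length ≤ 2 * cd.length := by
    induction cd with
    | nil => simp
    | cons p t ih =>
      simp only [List.flatMap_cons, List.length_append, List.length_cons]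
      split_ifs with h
      · omega
      · simp only [List.length_nil]
        omega
  exact le_trans (List.toFinset_card_le _) hlen

theorem stepF_infl (cd : List (Int × List Int)) (s : Finset Int) : s ⊆ stepF cd s := by
  intro x hx
  simp only [stepF, Finset.mem_union]
  exact Or.inl hx

theorem stepF_mono (cd : List (Int × List Int)) {s t : Finset Int} (h : s ⊆ t) :
    stepF cd s ⊆ stepF cd t := by
  exact Finset.union_subset_union h (Finset.biUnion_subset_biUnion_of_subset_left _ h)

theorem iter_subset_union (cd : List (Int × List Int)) (s : Finset Int) (k : Nat) :
    (stepF cd)^[k] s ⊆ s ∪ allCh cd := by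
  induction k with
  | zero => simp
  | succ k ih =>
    rw [Function.iterate_succ_apply']
    intro x hx
    simp only [stepF, Finset.mem_union] at hx
    rcases hx with hx | hx
    · exact ih hx
    · obtain ⟨m, _, hxm⟩ := Finset.mem_biUnion.mp hx
      exact Finset.mem_union_right _ (chl_subset_allCh cd m hxm)

theorem iter_infl (cd : List (Int × List Int)) (s : Finset Int) (k : Nat) :
    s ⊆ (stepF cd)^[k] s := by
  induction k with
  | zero => simp
  | succ k ih =>
    rw [Function.iterate_succ_apply']
    exact subset_trans ih (stepF_infl cd _)

-- generic fixpoint lemma for an inflationary function with bounded iterates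
theorem iterate_fix (f : Finset Int → Finset Int) (hinfl : ∀ t, t ⊆ f t)
    (s V : Finset Int) (hV : ∀ k, f^[k] s ⊆ V) (N : Nat) (hN : V.card < N) :
    f (f^[N] s) = f^[N] s := by
  have hprop : ∀ a, f a = a → ∀ m, f^[m] a = a := by
    intro a ha m
    induction m with
    | zero => rfl
    | succ m ih => rw [Function.iterate_succ_apply', ih, ha]
  by_cases hex : ∃ k, k ≤ N ∧ f (f^[k] s) = f^[k] s
  · obtain ⟨k, hk, hfix⟩ := hex
    have hNk : f^[N] s = f^[k] s := by
      have h1 : f^[N] s = f^[N - k] (f^[k] s) := by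
        rw [← Function.iterate_add_apply]
        congr 1
        omega
      rw [h1, hprop _ hfix]
    rw [hNk, hfix]
  · push Not at hex
    have hgrow : ∀ k, k ≤ N → k ≤ (f^[k] s).card := by
      intro k
      induction k with
      | zero => intro _; exact Nat.zero_le _
      | succ k ih =>
        intro hkN
        have h1 : k ≤ (f^[k] s).card := ih (by omega)
        have hss : f^[k] s ⊂ f^[k + 1] s := by
          rw [Function.iterate_succ_apply']
          exact HasSubset.Subset.ssubset_of_ne (hinfl _) (Ne.symm (hex k (by omega)))
        have := Finset.card_lt_card hss
        omega
    have h1 := hgrow N le_rfl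
    have h2 := Finset.card_le_card (hV N)
    omega

theorem reachF_fix (cd : List (Int × List Int)) (n : Int) :
    stepF cd (reachF cd n) = reachF cd n := by
  apply iterate_fix (stepF cd) (stepF_infl cd) {n} (insert n (allCh cd))
  · intro k
    intro x hx
    have := iter_subset_union cd {n} k hx
    simp only [Finset.mem_union, Finset.mem_singleton] at this
    simp only [Finset.mem_insert]
    tauto
  · have h1 := allCh_card cd
    have h2 := Finset.card_insert_le n (allCh cd)
    omega

theorem descF_fix (cd : List (Int × List Int)) (n : Int) :
    stepF cd (descF cd n) = descF cd n := by
  apply iterate_fix (stepF cd) (stepF_infl cd) _ (allCh cd)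
  · intro k
    intro x hx
    have := iter_subset_union cd (chl cd n).toFinset k hx
    simp only [Finset.mem_union] at this
    rcases this with h | h
    · exact chl_subset_allCh cd n h
    · exact h
  · have := allCh_card cd
    omega

theorem closure_min (cd : List (Int × List Int)) (s T : Finset Int)
    (hs : s ⊆ T) (hT : stepF cd T = T) (k : Nat) : (stepF cd)^[k] s ⊆ T := by
  induction k with
  | zero => exact hs
  | succ k ih =>
    rw [Function.iterate_succ_apply']
    calc stepF cd ((stepF cd)^[k] s) ⊆ stepF cd T := stepF_mono cd ih
    _ = T := hT

theorem mem_reachF_self (cd : List (Int × List Int)) (n : Int) : n ∈ reachF cd n := by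
  exact iter_infl cd {n} _ (Finset.mem_singleton_self n)

theorem chl_subset_of_closed (cd : List (Int × List Int)) (T : Finset Int)
    (hT : stepF cd T = T) (m : Int) (hm : m ∈ T) : (chl cd m).toFinset ⊆ T := by
  intro x hx
  rw [← hT]
  simp only [stepF, Finset.mem_union]
  exact Or.inr (Finset.mem_biUnion.mpr ⟨m, hm, hx⟩)

theorem reachF_closed_chl (cd : List (Int × List Int)) (n m c : Int)
    (hm : m ∈ reachF cd n) (hc : c ∈ chl cd m) : c ∈ reachF cd n := by
  exact chl_subset_of_closed cd _ (reachF_fix cd n) m hm (List.mem_toFinset.mpr hc)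

theorem chl_subset_descF (cd : List (Int × List Int)) (n : Int) :
    (chl cd n).toFinset ⊆ descF cd n := by
  exact iter_infl cd _ _

-- rank of a node: number of its proper descendants; strictly decreasing along edges
-- of the acyclic reachable part
def rankF (cd : List (Int × List Int)) (n : Int) : Nat := (descF cd n).card

theorem descF_child_subset (cd : List (Int × List Int)) (m c : Int) (hc : c ∈ chl cd m) :
    descF cd c ⊆ descF cd m := by
  have hcm : c ∈ descF cd m := chl_subset_descF cd m (List.mem_toFinset.mpr hc)
  have hseed : (chl cd c).toFinset ⊆ descF cd m :=
    chl_subset_of_closed cd _ (descF_fix cd m) c hcm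
  exact closure_min cd _ _ hseed (descF_fix cd m) _

theorem rankF_lt (cd : List (Int × List Int)) (m c : Int) (hc : c ∈ chl cd m)
    (hacyc : c ∉ descF cd c) : rankF cd c < rankF cd m := by
  have hcm : c ∈ descF cd m := chl_subset_descF cd m (List.mem_toFinset.mpr hc)
  apply Finset.card_lt_card
  rw [Finset.ssubset_def]
  exact ⟨descF_child_subset cd m c hc, fun hba => hacyc (hba hcm)⟩

-- goA is eventually constant in its fuel; Stable b n v: from fuel b on, goA returns v
def Stable (cd : List (Int × List Int)) (labels : List (Int × String)) (b : Nat) (n : Int) (v : String) : Prop :=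
  ∀ f, b ≤ f → goA cd labels f n = v

-- every binding of the results dict is a stable value of goA with bound b
def Good (cd : List (Int × List Int)) (labels : List (Int × String)) (b : Nat) (R : List (Int × String)) : Prop :=
  ∀ k v, pvGet? R k = some v → Stable cd labels b k v

theorem stable_qmark (cd : List (Int × List Int)) (labels : List (Int × String)) (n : Int)
    (h : 2 < (pvGetD cd n []).length) (b : Nat) : Stable cd labels (b + 1) n "???" := by
  intro f hf
  obtain ⟨g, rfl⟩ : ∃ g, f = g + 1 := ⟨f - 1, by omega⟩
  simp only [goA]
  have h0 : ¬ (pvGetD cd n []).length = 0 := by omega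
  have h1 : ¬ (pvGetD cd n []).length = 1 := by omega
  have h2 : ¬ (pvGetD cd n []).length = 2 := by omega
  simp only [if_neg h0, if_neg h1, if_neg h2]

theorem stable_resolved (cd : List (Int × List Int)) (labels : List (Int × String))
    (b : Nat) (R : List (Int × String)) (n : Int) (lab : String)
    (hG : Good cd labels b R) (hlab : pvGet? labels n = some lab)
    (hall : (pvGetD cd n []).all (fun c => (pvGet? R c).isSome) = true)
    (hle : (pvGetD cd n []).length ≤ 2) :
    Stable cd labels (b + 1) n
      (if (pvGetD cd n []).length = 0 then lab
       else if (pvGetD cd n []).length = 1 then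
         lab ++ " (" ++ pvGetD R ((pvGetD cd n []).getD 0 0) "" ++ ")"
       else
         "(" ++ pvGetD R ((pvGetD cd n []).getD 0 0) "" ++ ") " ++ lab ++ " (" ++
           pvGetD R ((pvGetD cd n []).getD 1 0) "" ++ ")") := by
  intro f hf
  obtain ⟨g, rfl⟩ : ∃ g, f = g + 1 := ⟨f - 1, by omega⟩
  have hg : b ≤ g := by omega
  have hlabD : pvGetD labels n "" = lab := by simp [pvGetD, hlab]
  by_cases h0 : (pvGetD cd n []).length = 0
  · simp only [goA, h0, hlabD, if_pos]
  · by_cases h1 : (pvGetD cd n []).length = 1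
    · obtain ⟨c0, hc0⟩ := List.length_eq_one_iff.mp h1
      have hc0m : c0 ∈ pvGetD cd n [] := by rw [hc0]; simp
      have hs0 := List.all_eq_true.mp hall c0 hc0m
      obtain ⟨w0, hw0⟩ := Option.isSome_iff_exists.mp (by simpa using hs0)
      have hgoa0 : goA cd labels g c0 = w0 := hG c0 w0 hw0 g hg
      have hwD : pvGetD R c0 "" = w0 := by simp [pvGetD, hw0]
      simp only [goA, if_neg h0, if_pos h1]
      rw [hc0, List.getD_cons_zero, hgoa0, hlabD, hwD]
    · have h2 : (pvGetD cd n []).length = 2 := by omega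
      obtain ⟨c0, c1, hc⟩ := List.length_eq_two.mp h2
      have hc0m : c0 ∈ pvGetD cd n [] := by rw [hc]; simp
      have hc1m : c1 ∈ pvGetD cd n [] := by rw [hc]; simp
      obtain ⟨w0, hw0⟩ := Option.isSome_iff_exists.mp (by simpa using List.all_eq_true.mp hall c0 hc0m)
      obtain ⟨w1, hw1⟩ := Option.isSome_iff_exists.mp (by simpa using List.all_eq_true.mp hall c1 hc1m)
      have hgoa0 : goA cd labels g c0 = w0 := hG c0 w0 hw0 g hg
      have hgoa1 : goA cd labels g c1 = w1 := hG c1 w1 hw1 g hg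
      have hwD0 : pvGetD R c0 "" = w0 := by simp [pvGetD, hw0]
      have hwD1 : pvGetD R c1 "" = w1 := by simp [pvGetD, hw1]
      simp only [goA, if_neg h0, if_neg h1, if_pos h2]
      rw [hc]
      simp only [List.getD_cons_zero, List.getD_cons_succ]
      rw [hgoa0, hgoa1, hlabD, hwD0, hwD1]

theorem Good_cons (cd : List (Int × List Int)) (labels : List (Int × String))
    (b : Nat) (R : List (Int × String)) (n : Int) (v : String)
    (hG : Good cd labels b R) (hS : Stable cd labels (b + 1) n v) :
    Good cd labels (b + 1) ((n, v) :: R) := by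
  intro k w hkw
  by_cases hk : k = n
  · subst hk
    simp only [pvGet?, if_pos trivial] at hkw
    have hvw : v = w := by simpa using hkw
    subst hvw
    exact hS
  · simp only [pvGet?, if_neg hk] at hkw
    exact fun f hf => hG k w hkw f (by omega)

-- the main round lemma: goRound preserves Good (bound grows by at most the number of
-- nodes it renders, which the pending list shrinks by), results grow monotonically,
-- every pending key stays pending or becomes resolved
theorem goRound_good (cd : List (Int × List Int)) (labels : List (Int × String))
    (P : List Int) (R : List (Int × String)) (b : Nat) (hG : Good cd labels b R) :
    ∃ b', Good cd labels b' (goRound cd labels P R).1 ∧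
      b' + (goRound cd labels P R).2.1.length ≤ b + P.length := by
  induction P generalizing R b with
  | nil => exact ⟨b, by simpa [goRound] using hG, by simp [goRound]⟩
  | cons n rest ih =>
    by_cases h1 : 2 < (pvGetD cd n []).length
    · have hG' : Good cd labels (b + 1) ((n, "???") :: R) :=
        Good_cons cd labels b R n _ hG (stable_qmark cd labels n h1 b)
      obtain ⟨b', hb'G, hb'⟩ := ih ((n, "???") :: R) (b + 1) hG'
      refine ⟨b', ?_, ?_⟩ <;> simp only [goRound, if_pos h1]
      · exact hb'G
      · simp only [List.length_cons]
        omega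
    · cases hlab : pvGet? labels n with
      | some lab =>
        by_cases hall : ((pvGetD cd n []).all fun c => (pvGet? R c).isSome) = true
        · have hG' := Good_cons cd labels b R n _ hG
            (stable_resolved cd labels b R n lab hG hlab hall (by omega))
          obtain ⟨b', hb'G, hb'⟩ := ih _ (b + 1) hG'
          refine ⟨b', ?_, ?_⟩ <;> simp only [goRound, if_neg h1, hlab, if_pos hall]
          · exact hb'G
          · simp only [List.length_cons]
            omega
        · obtain ⟨b', hb'G, hb'⟩ := ih R b hG
          refine ⟨b', ?_, ?_⟩ <;> simp only [goRound, if_neg h1, hlab, if_neg hall]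
          · exact hb'G
          · simp only [List.length_cons]
            omega
      | none =>
        obtain ⟨b', hb'G, hb'⟩ := ih R b hG
        refine ⟨b', ?_, ?_⟩ <;> simp only [goRound, if_neg h1, hlab]
        · exact hb'G
        · simp only [List.length_cons]
          omega

theorem goRound_monotone (cd : List (Int × List Int)) (labels : List (Int × String))
    (P : List Int) (R : List (Int × String)) (k : Int)
    (h : (pvGet? R k).isSome) : (pvGet? (goRound cd labels P R).1 k).isSome := by
  induction P generalizing R with
  | nil => simpa [goRound] using h
  | cons n rest ih =>
    have hcons : ∀ v : String, (pvGet? ((n, v) :: R) k).isSome := by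
      intro v
      by_cases hk : k = n
      · simp [pvGet?, hk]
      · simpa [pvGet?, hk] using h
    by_cases h1 : 2 < (pvGetD cd n []).length
    · simpa only [goRound, if_pos h1] using ih _ (hcons _)
    · cases hlab : pvGet? labels n with
      | some lab =>
        by_cases hall : ((pvGetD cd n []).all fun c => (pvGet? R c).isSome) = true
        · simpa only [goRound, if_neg h1, hlab, if_pos hall] using ih _ (hcons _)
        · simpa only [goRound, if_neg h1, hlab, if_neg hall] using ih _ h
      | none => simpa only [goRound, if_neg h1, hlab] using ih _ h

theorem goRound_keys (cd : List (Int × List Int)) (labels : List (Int × String))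
    (P : List Int) (R : List (Int × String)) (k : Int) (hk : k ∈ P) :
    k ∈ (goRound cd labels P R).2.1 ∨ (pvGet? (goRound cd labels P R).1 k).isSome := by
  induction P generalizing R with
  | nil => simp at hk
  | cons n rest ih =>
    have hself : ∀ v : String, (pvGet? ((n, v) :: R) n).isSome := by
      intro v; simp [pvGet?]
    rcases List.mem_cons.mp hk with rfl | hk2
    · by_cases h1 : 2 < (pvGetD cd k []).length
      · simp only [goRound, if_pos h1]
        exact Or.inr (goRound_monotone cd labels rest _ k (hself _))
      · cases hlab : pvGet? labels k with
        | some lab =>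
          by_cases hall : ((pvGetD cd k []).all fun c => (pvGet? R c).isSome) = true
          · simp only [goRound, if_neg h1, hlab, if_pos hall]
            exact Or.inr (goRound_monotone cd labels rest _ k (hself _))
          · simp only [goRound, if_neg h1, hlab, if_neg hall]
            exact Or.inl (List.mem_cons_self)
        | none =>
          simp only [goRound, if_neg h1, hlab]
          exact Or.inl (List.mem_cons_self)
    · by_cases h1 : 2 < (pvGetD cd n []).length
      · simpa only [goRound, if_pos h1] using ih _ hk2
      · cases hlab : pvGet? labels n with
        | some lab =>
          by_cases hall : ((pvGetD cd n []).all fun c => (pvGet? R c).isSome) = true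
          · simpa only [goRound, if_neg h1, hlab, if_pos hall] using ih _ hk2
          · rcases ih R hk2 with h | h
            · exact Or.inl (by simp only [goRound, if_neg h1, hlab, if_neg hall]; exact List.mem_cons_of_mem _ h)
            · exact Or.inr (by simpa only [goRound, if_neg h1, hlab, if_neg hall] using h)
        | none =>
          rcases ih R hk2 with h | h
          · exact Or.inl (by simp only [goRound, if_neg h1, hlab]; exact List.mem_cons_of_mem _ h)
          · exact Or.inr (by simpa only [goRound, if_neg h1, hlab] using h)

theorem goRound_still_len (cd : List (Int × List Int)) (labels : List (Int × String))
    (P : List Int) (R : List (Int × String)) :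
    (goRound cd labels P R).2.1.length ≤ P.length ∧
    ((goRound cd labels P R).2.2 = true → (goRound cd labels P R).2.1.length < P.length) := by
  induction P generalizing R with
  | nil => simp [goRound]
  | cons n rest ih =>
    by_cases h1 : 2 < (pvGetD cd n []).length
    · obtain ⟨ha, _⟩ := ih ((n, "???") :: R)
      simp only [goRound, if_pos h1]
      constructor
      · simp only [List.length_cons]
        omega
      · intro _
        simp only [List.length_cons]
        omega
    · cases hlab : pvGet? labels n with
      | some lab =>
        by_cases hall : ((pvGetD cd n []).all fun c => (pvGet? R c).isSome) = true
        · obtain ⟨ha, _⟩ := ih ((n, (if (pvGetD cd n []).length = 0 then lab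
            else if (pvGetD cd n []).length = 1 then lab ++ " (" ++ pvGetD R ((pvGetD cd n []).getD 0 0) "" ++ ")"
            else "(" ++ pvGetD R ((pvGetD cd n []).getD 0 0) "" ++ ") " ++ lab ++ " (" ++ pvGetD R ((pvGetD cd n []).getD 1 0) "" ++ ")")) :: R)
          simp only [goRound, if_neg h1, hlab, if_pos hall]
          constructor
          · simp only [List.length_cons]
            omega
          · intro _
            simp only [List.length_cons]
            omega
        · obtain ⟨ha, hb⟩ := ih R
          simp only [goRound, if_neg h1, hlab, if_neg hall]
          constructor
          · simp only [List.length_cons]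
            omega
          · intro hp
            have := hb (by simpa using hp)
            simp only [List.length_cons]
            omega
      | none =>
        obtain ⟨ha, hb⟩ := ih R
        simp only [goRound, if_neg h1, hlab]
        constructor
        · simp only [List.length_cons]
          omega
        · intro hp
          have := hb (by simpa using hp)
          simp only [List.length_cons]
          omega

theorem goRound_no_progress (cd : List (Int × List Int)) (labels : List (Int × String))
    (P : List Int) (R : List (Int × String)) (h : (goRound cd labels P R).2.2 = false) :
    (goRound cd labels P R).1 = R ∧ (goRound cd labels P R).2.1 = P ∧
    ∀ n ∈ P, (pvGetD cd n []).length ≤ 2 ∧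
      (pvGet? labels n = none ∨ ∃ c ∈ pvGetD cd n [], pvGet? R c = none) := by
  induction P generalizing R with
  | nil => exact ⟨by simp [goRound], by simp [goRound], by simp⟩
  | cons n rest ih =>
    by_cases h1 : 2 < (pvGetD cd n []).length
    · have h3 : (goRound cd labels (n :: rest) R).2.2 = true := by
        simp only [goRound, if_pos h1]
      simp [h3] at h
    · cases hlab : pvGet? labels n with
      | some lab =>
        by_cases hall : ((pvGetD cd n []).all fun c => (pvGet? R c).isSome) = true
        · have h3 : (goRound cd labels (n :: rest) R).2.2 = true := by
            simp only [goRound, if_neg h1, hlab, if_pos hall]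
          simp [h3] at h
        · have h2 : (goRound cd labels rest R).2.2 = false := by
            simpa only [goRound, if_neg h1, hlab, if_neg hall] using h
          obtain ⟨ha, hb, hc⟩ := ih R h2
          refine ⟨by simpa only [goRound, if_neg h1, hlab, if_neg hall] using ha,
            by simp only [goRound, if_neg h1, hlab, if_neg hall]; rw [hb],
            ?_⟩
          intro m hm
          rcases List.mem_cons.mp hm with rfl | hm2
          · refine ⟨by omega, Or.inr ?_⟩
            simp only [List.all_eq_true, not_forall] at hall
            obtain ⟨c, hc1, hc2⟩ := hall
            have hns : ¬ (pvGet? R c).isSome = true := hc2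
            exact ⟨c, hc1, by simpa [Option.isSome_iff_exists, Option.eq_none_iff_forall_ne_some] using hns⟩
          · exact hc m hm2
      | none =>
        have h2 : (goRound cd labels rest R).2.2 = false := by
          simpa only [goRound, if_neg h1, hlab] using h
        obtain ⟨ha, hb, hc⟩ := ih R h2
        refine ⟨by simpa only [goRound, if_neg h1, hlab] using ha,
          by simp only [goRound, if_neg h1, hlab]; rw [hb],
          ?_⟩
        intro m hm
        rcases List.mem_cons.mp hm with rfl | hm2
        · exact ⟨by omega, Or.inl hlab⟩
        · exact hc m hm2

-- a terminal state of the loop: results R* with pending P* making no progress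
def Terminal (cd : List (Int × List Int)) (labels : List (Int × String))
    (P : List Int) (R : List (Int × String)) : Prop :=
  ∀ n ∈ P, (pvGetD cd n []).length ≤ 2 ∧
    (pvGet? labels n = none ∨ ∃ c ∈ pvGetD cd n [], pvGet? R c = none)

theorem goLoop_terminal (cd : List (Int × List Int)) (labels : List (Int × String)) :
    ∀ (fuel : Nat) (P : List Int) (R : List (Int × String)) (b : Nat),
      Good cd labels b R → P.length < fuel →
      (∀ k ∈ cd.map Prod.fst, k ∈ P ∨ (pvGet? R k).isSome) →
      ∃ P' b',
        Good cd labels b' (goLoop cd labels fuel P R) ∧ b' + P'.length ≤ b + P.length ∧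
        (∀ k ∈ cd.map Prod.fst, k ∈ P' ∨ (pvGet? (goLoop cd labels fuel P R) k).isSome) ∧
        Terminal cd labels P' (goLoop cd labels fuel P R) := by
  intro fuel
  induction fuel with
  | zero =>
    intro P R b _ hlen _
    exact absurd hlen (by omega)
  | succ f ih =>
    intro P R b hG hlen hkeys
    cases hp : (goRound cd labels P R).2.2 with
    | false =>
      obtain ⟨ha, hb, hc⟩ := goRound_no_progress cd labels P R hp
      have hL : goLoop cd labels (Nat.succ f) P R = R := by
        simp only [goLoop, hp, Bool.false_eq_true, if_false, ha]
      refine ⟨P, b, ?_, by omega, ?_, ?_⟩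
      · rw [hL]; exact hG
      · rw [hL]; exact hkeys
      · rw [hL]; exact hc
    | true =>
      obtain ⟨b', hG', hb'⟩ := goRound_good cd labels P R b hG
      obtain ⟨hlen1, hlen2⟩ := goRound_still_len cd labels P R
      have hlt := hlen2 hp
      have hkeys' : ∀ k ∈ cd.map Prod.fst,
          k ∈ (goRound cd labels P R).2.1 ∨ (pvGet? (goRound cd labels P R).1 k).isSome := by
        intro k hk
        rcases hkeys k hk with h | h
        · exact goRound_keys cd labels P R k h
        · exact Or.inr (goRound_monotone cd labels P R k h)
      obtain ⟨P', b'', h1, h2, h3, h4⟩ :=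
        ih (goRound cd labels P R).2.1 (goRound cd labels P R).1 b' hG' (by omega) hkeys'
      have hL : goLoop cd labels (Nat.succ f) P R =
          goLoop cd labels f (goRound cd labels P R).2.1 (goRound cd labels P R).1 := by
        simp only [goLoop, hp, if_true]
      refine ⟨P', b'', ?_, by omega, ?_, ?_⟩
      · rw [hL]; exact h1
      · rw [hL]; exact h3
      · rw [hL]; exact h4

-- at a terminal state, every reachable node is resolved (strong induction on rank)
theorem terminal_complete (cd : List (Int × List Int)) (labels : List (Int × String))
    (node : Int) (hPre : Pre_condition_to_string node cd labels)
    (P : List Int) (R : List (Int × String))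
    (hkeys : ∀ k ∈ cd.map Prod.fst, k ∈ P ∨ (pvGet? R k).isSome)
    (hterm : Terminal cd labels P R) :
    ∀ m ∈ reachF cd node, (pvGet? R m).isSome := by
  suffices H : ∀ r m, m ∈ reachF cd node → rankF cd m ≤ r → (pvGet? R m).isSome by
    exact fun m hm => H (rankF cd m) m hm le_rfl
  intro r
  induction r with
  | zero =>
    intro m hm hr
    by_contra hns
    have hmk := (hPre.1 m hm).1
    rcases hkeys m hmk with hP | hres
    · obtain ⟨hlen, hrest⟩ := hterm m hP
      rcases hrest with hlabnone | ⟨c, hcm, _⟩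
      · have hlen' : ((lookupCh cd m).getD []).length ≤ 2 := by
          rw [lookupCh_eq_pvGet?]
          exact hlen
        obtain ⟨lab, hlab⟩ := mem_keys_get? labels m ((hPre.1 m hm).2 hlen')
        rw [hlab] at hlabnone
        simp at hlabnone
      · obtain ⟨cs0, hcs0⟩ := mem_keys_get? cd m hmk
        have hD : pvGetD cd m [] = cs0 := by simp [pvGetD, hcs0]
        have hchl : chl cd m = pvGetD cd m [] := by
          rw [hD] at hlen ⊢
          simp [chl, lookupCh_eq_pvGet?, hcs0, hlen]
        have hcchl : c ∈ chl cd m := by rw [hchl]; exact hcm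
        have hcreach : c ∈ reachF cd node := reachF_closed_chl cd node m c hm hcchl
        have := rankF_lt cd m c hcchl (hPre.2 c hcreach)
        omega
    · exact hns hres
  | succ r ihr =>
    intro m hm hr
    by_contra hns
    have hmk := (hPre.1 m hm).1
    rcases hkeys m hmk with hP | hres
    · obtain ⟨hlen, hrest⟩ := hterm m hP
      rcases hrest with hlabnone | ⟨c, hcm, hcnone⟩
      · have hlen' : ((lookupCh cd m).getD []).length ≤ 2 := by
          rw [lookupCh_eq_pvGet?]
          exact hlen
        obtain ⟨lab, hlab⟩ := mem_keys_get? labels m ((hPre.1 m hm).2 hlen')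
        rw [hlab] at hlabnone
        simp at hlabnone
      · obtain ⟨cs0, hcs0⟩ := mem_keys_get? cd m hmk
        have hD : pvGetD cd m [] = cs0 := by simp [pvGetD, hcs0]
        have hchl : chl cd m = pvGetD cd m [] := by
          rw [hD] at hlen ⊢
          simp [chl, lookupCh_eq_pvGet?, hcs0, hlen]
        have hcchl : c ∈ chl cd m := by rw [hchl]; exact hcm
        have hcreach : c ∈ reachF cd node := reachF_closed_chl cd node m c hm hcchl
        have hrank := rankF_lt cd m c hcchl (hPre.2 c hcreach)
        have hcres := ihr c hcreach (by omega)
        rw [hcnone] at hcres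
        simp at hcres
    · exact hns hres

-- ===== VERDICT (by name: the statement is the Claim_ definition above) =====
theorem condition_to_string_spec : Claim_equal_condition_to_string := by
  intro node cd labels _hDom hPre
  unfold Spec_condition_to_string condition_to_string condition_to_string_alt
  have h0 : Good cd labels 0 [] := by
    intro k v h
    simp [pvGet?] at h
  have hkeys0 : ∀ k ∈ cd.map Prod.fst, k ∈ cd.map Prod.fst ∨ (pvGet? ([] : List (Int × String)) k).isSome :=
    fun k hk => Or.inl hk
  have hlen : (cd.map Prod.fst).length < cd.length + 1 := by simp
  obtain ⟨P', b', hG', hb', hkeys', hterm⟩ :=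
    goLoop_terminal cd labels (cd.length + 1) (cd.map Prod.fst) [] 0 h0 hlen hkeys0
  have hres := terminal_complete cd labels node hPre P' _ hkeys' hterm node (mem_reachF_self cd node)
  obtain ⟨v, hv⟩ := Option.isSome_iff_exists.mp hres
  have hblt : b' ≤ cd.length := by
    simp only [List.length_map] at hb'
    omega
  have hA : goA cd labels (cd.length + 1) node = v := hG' node v hv (cd.length + 1) (by omega)
  rw [hA]
  simp [pvGetD, hv]
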